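-- pv_equiv track=rewrite | github.com/richfrem/Project_Sanctuary | council_orchestrator/orchestrator.py | _classify_response_type
-- ===== SOURCE A (Python) =====
-- def _classify_response_type(response: str, role: str) -> str:
--     """Classify the type of response based on content and role."""
--     response_lower = response.lower()
--
--     # Role-based classification
--     if role == "COORDINATOR":
--         if any(word in response_lower for word in ["plan", "strategy", "coordinate", "organize"]):
--             return "strategy"
--         elif any(word in response_lower for word in ["analysis", "evaluate", "assess"]):
--             return "analysis"
--     elif role == "STRATEGIST":
--         if any(word in response_lower for word in ["propose", "suggest", "recommend", "solution"]):
--             return "proposal"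
--         elif any(word in response_lower for word in ["design", "architecture", "structure"]):
--             return "design"
--     elif role == "AUDITOR":
--         if any(word in response_lower for word in ["review", "audit", "validate", "verify"]):
--             return "critique"
--         elif any(word in response_lower for word in ["risk", "concern", "issue", "problem"]):
--             return "analysis"
--
--     # Content-based fallback
--     if "propose" in response_lower or "suggest" in response_lower:
--         return "proposal"
--     elif "analysis" in response_lower or "evaluate" in response_lower:
--         return "analysis"
--     elif "critique" in response_lower or "review" in response_lower:
--         return "critique"
--     else:
--         return "discussion"
-- ===== SOURCE B (Python) =====
-- # B: flatten all rules into one per-keyword priority list (role-specific entries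
-- # first, then the content fallback), and compute the answer with a single
-- # reverse fold: start from "discussion" and walk the list back-to-front,
-- # overwriting the accumulator whenever a keyword occurs, so the last write
-- # (the highest-priority matching keyword) wins.  No early return, no cascade.
--
-- _ROLE_ENTRIES = {
--     "COORDINATOR": (("plan", "strategy"), ("strategy", "strategy"),
--                     ("coordinate", "strategy"), ("organize", "strategy"),
--                     ("analysis", "analysis"), ("evaluate", "analysis"),
--                     ("assess", "analysis")),
--     "STRATEGIST": (("propose", "proposal"), ("suggest", "proposal"),
--                    ("recommend", "proposal"), ("solution", "proposal"),
--                    ("design", "design"), ("architecture", "design"),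
--                    ("structure", "design")),
--     "AUDITOR": (("review", "critique"), ("audit", "critique"),
--                 ("validate", "critique"), ("verify", "critique"),
--                 ("risk", "analysis"), ("concern", "analysis"),
--                 ("issue", "analysis"), ("problem", "analysis")),
-- }
--
-- _FALLBACK_ENTRIES = (("propose", "proposal"), ("suggest", "proposal"),
--                      ("analysis", "analysis"), ("evaluate", "analysis"),
--                      ("critique", "critique"), ("review", "critique"))
--
--
-- def _classify_response_type(response: str, role: str) -> str:
--     text = response.lower()
--     entries = _ROLE_ENTRIES.get(role, ()) + _FALLBACK_ENTRIES
--     label = "discussion"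
--     for keyword, rule_label in reversed(entries):
--         if keyword in text:
--             label = rule_label
--     return label
-- ===== Notes on version B (the rewrite author's own statement) =====
-- stated objective: alternative
-- what changed: Replaced A's early-return if/elif cascade over keyword groups by a flat per-keyword priority list (role entries then fallback) folded once back-to-front with an overwriting accumulator, so the highest-priority matching keyword's label is written last.
import Mathlib
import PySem

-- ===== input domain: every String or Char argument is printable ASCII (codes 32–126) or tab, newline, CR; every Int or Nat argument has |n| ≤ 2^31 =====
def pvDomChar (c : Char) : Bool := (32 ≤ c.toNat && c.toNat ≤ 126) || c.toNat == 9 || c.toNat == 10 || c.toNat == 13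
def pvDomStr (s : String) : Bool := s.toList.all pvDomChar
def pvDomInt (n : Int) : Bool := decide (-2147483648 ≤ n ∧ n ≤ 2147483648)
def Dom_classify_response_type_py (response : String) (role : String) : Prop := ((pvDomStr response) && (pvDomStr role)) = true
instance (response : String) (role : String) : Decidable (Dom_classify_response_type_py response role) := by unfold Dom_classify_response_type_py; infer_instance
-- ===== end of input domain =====

-- B flattens all rules to one per-keyword priority list and computes the label by a single
-- reverse fold with an overwriting accumulator instead of A's early-return if/elif cascade;
-- objective: alternative decomposition, same cost.

-- ===== PORT A =====
-- literal transliteration of A's if/elif cascade; 'word in response_lower' is PySem.Str.isIn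
def classify_response_type_py (response : String) (role : String) : String :=
  let response_lower := PySem.Str.lower response
  -- role-based classification; each branch may fall through to the content-based fallback
  let roleResult : Option String :=
    if role == "COORDINATOR" then
      if ["plan", "strategy", "coordinate", "organize"].any (fun word => PySem.Str.isIn word response_lower) then
        some "strategy"
      else if ["analysis", "evaluate", "assess"].any (fun word => PySem.Str.isIn word response_lower) then
        some "analysis"
      else none
    else if role == "STRATEGIST" then
      if ["propose", "suggest", "recommend", "solution"].any (fun word => PySem.Str.isIn word response_lower) then
        some "proposal"
      else if ["design", "architecture", "structure"].any (fun word => PySem.Str.isIn word response_lower) then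
        some "design"
      else none
    else if role == "AUDITOR" then
      if ["review", "audit", "validate", "verify"].any (fun word => PySem.Str.isIn word response_lower) then
        some "critique"
      else if ["risk", "concern", "issue", "problem"].any (fun word => PySem.Str.isIn word response_lower) then
        some "analysis"
      else none
    else none
  match roleResult with
  | some r => r
  | none =>
    -- content-based fallback
    if PySem.Str.isIn "propose" response_lower || PySem.Str.isIn "suggest" response_lower then
      "proposal"
    else if PySem.Str.isIn "analysis" response_lower || PySem.Str.isIn "evaluate" response_lower then
      "analysis"
    else if PySem.Str.isIn "critique" response_lower || PySem.Str.isIn "review" response_lower then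
      "critique"
    else
      "discussion"

-- ===== PORT B =====
-- per-keyword entries in priority order, role-specific first
def pvRoleEntries : PySem.Dict String (List (String × String)) :=
  PySem.Dict.mk
  [("COORDINATOR", [("plan", "strategy"), ("strategy", "strategy"),
                    ("coordinate", "strategy"), ("organize", "strategy"),
                    ("analysis", "analysis"), ("evaluate", "analysis"),
                    ("assess", "analysis")]),
   ("STRATEGIST", [("propose", "proposal"), ("suggest", "proposal"),
                   ("recommend", "proposal"), ("solution", "proposal"),
                   ("design", "design"), ("architecture", "design"),
                   ("structure", "design")]),
   ("AUDITOR", [("review", "critique"), ("audit", "critique"),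
                ("validate", "critique"), ("verify", "critique"),
                ("risk", "analysis"), ("concern", "analysis"),
                ("issue", "analysis"), ("problem", "analysis")])]

def pvFallbackEntries : List (String × String) :=
  [("propose", "proposal"), ("suggest", "proposal"),
   ("analysis", "analysis"), ("evaluate", "analysis"),
   ("critique", "critique"), ("review", "critique")]

-- reverse fold: walk the priority list back-to-front, overwriting on a match
def classify_response_type_py_alt (response : String) (role : String) : String :=
  let text := PySem.Str.lower response
  let entries := (PySem.Dict.getD pvRoleEntries role []) ++ pvFallbackEntries
  entries.reverse.foldl
    (fun label e => if PySem.Str.isIn e.1 text then e.2 else label) "discussion"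

-- ===== PRECONDITION & SPEC =====
def Spec_classify_response_type_py (response : String) (role : String) (out : String) : Prop := out = classify_response_type_py_alt response role
instance (response : String) (role : String) (out : String) : Decidable (Spec_classify_response_type_py response role out) := by unfold Spec_classify_response_type_py; infer_instance

-- ===== CLAIM (what is proved, stated in full; the proofs are below) =====
def Claim_equal_classify_response_type_py : Prop := ∀ (response : String) (role : String), Dom_classify_response_type_py response role → Spec_classify_response_type_py response role (classify_response_type_py response role)

-- ===== LEMMAS AND PROOFS =====
-- first-match reading of B's reverse fold, used only in the proof
def pvFirst (text : String) : List (String × String) → String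
  | [] => "discussion"
  | e :: rest => if PySem.Str.isIn e.1 text then e.2 else pvFirst text rest

theorem pvFold_eq_pvFirst (l : List (String × String)) (text : String) :
    l.reverse.foldl (fun label e => if PySem.Str.isIn e.1 text then e.2 else label)
      "discussion" = pvFirst text l := by
  induction l with
  | nil => rfl
  | cons e rest ih =>
    simp only [List.reverse_cons, List.foldl_append, List.foldl_cons, List.foldl_nil, pvFirst, ih]

set_option maxHeartbeats 2000000 in
-- ===== VERDICT (by name: the statement is the Claim_ definition above) =====
theorem classify_response_type_py_spec : Claim_equal_classify_response_type_py := by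
  intro response role _
  unfold Spec_classify_response_type_py classify_response_type_py classify_response_type_py_alt
  rw [pvFold_eq_pvFirst]
  by_cases hp : role = "COORDINATOR"
  case pos =>
    subst hp
    simp only [show PySem.Dict.getD pvRoleEntries "COORDINATOR" ([] : List (String × String)) =
        [("plan", "strategy"), ("strategy", "strategy"), ("coordinate", "strategy"),
         ("organize", "strategy"), ("analysis", "analysis"), ("evaluate", "analysis"),
         ("assess", "analysis")] from rfl,
      beq_self_eq_true, if_true, List.any_cons, List.any_nil, Bool.or_false,
      pvFallbackEntries, List.cons_append, List.nil_append, pvFirst]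
    generalize PySem.Str.isIn "plan" (PySem.Str.lower response) = b1
    generalize PySem.Str.isIn "strategy" (PySem.Str.lower response) = b2
    generalize PySem.Str.isIn "coordinate" (PySem.Str.lower response) = b3
    generalize PySem.Str.isIn "organize" (PySem.Str.lower response) = b4
    generalize PySem.Str.isIn "analysis" (PySem.Str.lower response) = b5
    generalize PySem.Str.isIn "evaluate" (PySem.Str.lower response) = b6
    generalize PySem.Str.isIn "assess" (PySem.Str.lower response) = b7
    generalize PySem.Str.isIn "propose" (PySem.Str.lower response) = b8
    generalize PySem.Str.isIn "suggest" (PySem.Str.lower response) = b9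
    generalize PySem.Str.isIn "critique" (PySem.Str.lower response) = b10
    generalize PySem.Str.isIn "review" (PySem.Str.lower response) = b11
    revert b1 b2 b3 b4 b5 b6 b7 b8 b9 b10 b11
    decide
  case neg =>
  by_cases hs : role = "STRATEGIST"
  case pos =>
    subst hs
    simp only [show ("STRATEGIST" == "COORDINATOR") = false from rfl, Bool.false_eq_true,
      if_false, beq_self_eq_true, if_true,
      show PySem.Dict.getD pvRoleEntries "STRATEGIST" ([] : List (String × String)) =
        [("propose", "proposal"), ("suggest", "proposal"), ("recommend", "proposal"),
         ("solution", "proposal"), ("design", "design"), ("architecture", "design"),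
         ("structure", "design")] from rfl,
      List.any_cons, List.any_nil, Bool.or_false,
      pvFallbackEntries, List.cons_append, List.nil_append, pvFirst]
    generalize PySem.Str.isIn "propose" (PySem.Str.lower response) = b1
    generalize PySem.Str.isIn "suggest" (PySem.Str.lower response) = b2
    generalize PySem.Str.isIn "recommend" (PySem.Str.lower response) = b3
    generalize PySem.Str.isIn "solution" (PySem.Str.lower response) = b4
    generalize PySem.Str.isIn "design" (PySem.Str.lower response) = b5
    generalize PySem.Str.isIn "architecture" (PySem.Str.lower response) = b6
    generalize PySem.Str.isIn "structure" (PySem.Str.lower response) = b7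
    generalize PySem.Str.isIn "analysis" (PySem.Str.lower response) = b8
    generalize PySem.Str.isIn "evaluate" (PySem.Str.lower response) = b9
    generalize PySem.Str.isIn "critique" (PySem.Str.lower response) = b10
    generalize PySem.Str.isIn "review" (PySem.Str.lower response) = b11
    revert b1 b2 b3 b4 b5 b6 b7 b8 b9 b10 b11
    decide
  case neg =>
  by_cases ha : role = "AUDITOR"
  case pos =>
    subst ha
    simp only [show ("AUDITOR" == "COORDINATOR") = false from rfl,
      show ("AUDITOR" == "STRATEGIST") = false from rfl, Bool.false_eq_true,
      if_false, beq_self_eq_true, if_true,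
      show PySem.Dict.getD pvRoleEntries "AUDITOR" ([] : List (String × String)) =
        [("review", "critique"), ("audit", "critique"), ("validate", "critique"),
         ("verify", "critique"), ("risk", "analysis"), ("concern", "analysis"),
         ("issue", "analysis"), ("problem", "analysis")] from rfl,
      List.any_cons, List.any_nil, Bool.or_false,
      pvFallbackEntries, List.cons_append, List.nil_append, pvFirst]
    generalize PySem.Str.isIn "review" (PySem.Str.lower response) = b1
    generalize PySem.Str.isIn "audit" (PySem.Str.lower response) = b2
    generalize PySem.Str.isIn "validate" (PySem.Str.lower response) = b3
    generalize PySem.Str.isIn "verify" (PySem.Str.lower response) = b4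
    generalize PySem.Str.isIn "risk" (PySem.Str.lower response) = b5
    generalize PySem.Str.isIn "concern" (PySem.Str.lower response) = b6
    generalize PySem.Str.isIn "issue" (PySem.Str.lower response) = b7
    generalize PySem.Str.isIn "problem" (PySem.Str.lower response) = b8
    generalize PySem.Str.isIn "propose" (PySem.Str.lower response) = b9
    generalize PySem.Str.isIn "suggest" (PySem.Str.lower response) = b10
    generalize PySem.Str.isIn "analysis" (PySem.Str.lower response) = b11
    generalize PySem.Str.isIn "evaluate" (PySem.Str.lower response) = b12
    generalize PySem.Str.isIn "critique" (PySem.Str.lower response) = b13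
    revert b1 b2 b3 b4 b5 b6 b7 b8 b9 b10 b11 b12 b13
    decide
  case neg =>
    have hC : (role == "COORDINATOR") = false := beq_eq_false_iff_ne.mpr hp
    have hS : (role == "STRATEGIST") = false := beq_eq_false_iff_ne.mpr hs
    have hA : (role == "AUDITOR") = false := beq_eq_false_iff_ne.mpr ha
    have hC' : ("COORDINATOR" == role) = false := beq_eq_false_iff_ne.mpr (Ne.symm hp)
    have hS' : ("STRATEGIST" == role) = false := beq_eq_false_iff_ne.mpr (Ne.symm hs)
    have hA' : ("AUDITOR" == role) = false := beq_eq_false_iff_ne.mpr (Ne.symm ha)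
    have h0 : PySem.Dict.getD pvRoleEntries role ([] : List (String × String)) = [] := by
      simp [pvRoleEntries, PySem.Dict.getD, PySem.Dict.get?, List.find?, hC', hS', hA']
    simp only [hC, hS, hA, Bool.false_eq_true, if_false, h0,
      pvFallbackEntries, List.nil_append, pvFirst]
    generalize PySem.Str.isIn "propose" (PySem.Str.lower response) = b1
    generalize PySem.Str.isIn "suggest" (PySem.Str.lower response) = b2
    generalize PySem.Str.isIn "analysis" (PySem.Str.lower response) = b3
    generalize PySem.Str.isIn "evaluate" (PySem.Str.lower response) = b4
    generalize PySem.Str.isIn "critique" (PySem.Str.lower response) = b5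
    generalize PySem.Str.isIn "review" (PySem.Str.lower response) = b6
    revert b1 b2 b3 b4 b5 b6
    decide
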